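-- pv_equiv track=rewrite | github.com/thomast8/auto-scientist | src/auto_scientist/agents/_notebook_mcp_server.py | _build_status
-- ===== SOURCE A (Python) =====
-- from typing import Any
--
-- def _build_status(entries: list[dict[str, Any]]) -> str:
--     """Build a counts-only status summary (no TOC, since TOC is inline in prompt)."""
--     by_source: dict[str, int] = {}
--     for entry in entries:
--         src = entry.get("source", "")
--         by_source[src] = by_source.get(src, 0) + 1
--
--     lines = [f"Total: {len(entries)} notebook entries"]
--     for src in ["ingestor", "scientist", "revision", "stop_gate"]:
--         count = by_source.get(src, 0)
--         if count:
--             lines.append(f"  {src}: {count}")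
--     for src, count in sorted(by_source.items()):
--         if src not in {"ingestor", "scientist", "revision", "stop_gate"} and count:
--             lines.append(f"  {src}: {count}")
--     return "\n".join(lines)
-- ===== SOURCE B (Python) =====
-- def _build_status(entries):
--     """Build a counts-only status summary (no TOC, since TOC is inline in prompt)."""
--     priority = ["ingestor", "scientist", "revision", "stop_gate"]
--
--     def rank(s):
--         return (priority.index(s), "") if s in priority else (len(priority), s)
--
--     srcs = sorted((e.get("source", "") for e in entries), key=rank)
--     lines = [f"Total: {len(entries)} notebook entries"]
--     prev, run = None, 0
--     for s in srcs:
--         if s == prev: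
--             run += 1
--         else:
--             if prev is not None:
--                 lines.append(f"  {prev}: {run}")
--             prev, run = s, 1
--     if prev is not None:
--         lines.append(f"  {prev}: {run}")
--     return "\n".join(lines)
-- ===== Notes on version B (the rewrite author's own statement) =====
-- stated objective: alternative
-- what changed: B has no counting dict and no per-source emission passes: it sorts the source list once by a rank key (priority position, then name) and produces all lines in a single run-length scan with a prev/run accumulator, where A counts into a dict and then emits in two passes (fixed priority loop, then sorted dict items).
import Mathlib
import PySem

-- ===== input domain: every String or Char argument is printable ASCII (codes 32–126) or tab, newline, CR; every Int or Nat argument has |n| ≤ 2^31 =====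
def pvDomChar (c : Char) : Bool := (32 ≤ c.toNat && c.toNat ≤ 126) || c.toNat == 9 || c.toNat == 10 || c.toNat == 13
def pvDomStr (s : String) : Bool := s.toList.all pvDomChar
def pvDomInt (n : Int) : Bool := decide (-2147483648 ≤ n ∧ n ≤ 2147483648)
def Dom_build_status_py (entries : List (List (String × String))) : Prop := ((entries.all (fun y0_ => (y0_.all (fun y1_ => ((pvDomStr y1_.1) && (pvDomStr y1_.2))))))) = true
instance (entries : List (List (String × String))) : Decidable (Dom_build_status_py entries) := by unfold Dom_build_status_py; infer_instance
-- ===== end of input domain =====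

-- B drops A's counting dict and its two emission passes entirely: it sorts the source names once
-- by a rank key (priority position, then name) and emits the summary in a single run-length scan.

-- entry.get("source", "") — first-match association-list lookup (Python dict lookup), shared by both ports
def pvGetSource (e : List (String × String)) : String :=
  ((e.find? (fun p => p.1 == "source")).map (·.2)).getD ""

def pvPriority : List String := ["ingestor", "scientist", "revision", "stop_gate"]

-- ===== PORT A =====
def build_status_py (entries : List (List (String × String))) : String :=
  let by_source : PySem.Dict String Int :=
    entries.foldl (fun d e =>
      let src := pvGetSource e
      d.insert src (d.getD src 0 + 1)) PySem.Dict.empty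
  let lines : List String := ["Total: " ++ PySem.Int.toStr entries.length ++ " notebook entries"]
  let lines := pvPriority.foldl (fun ls src =>
      let count := by_source.getD src 0
      if count ≠ 0 then ls ++ ["  " ++ src ++ ": " ++ PySem.Int.toStr count] else ls) lines
  let lines := (PySem.List.sorted2 by_source.items (·.1) (·.2)).foldl (fun ls p =>
      if p.1 ∉ pvPriority ∧ p.2 ≠ 0
      then ls ++ ["  " ++ p.1 ++ ": " ++ PySem.Int.toStr p.2] else ls) lines
  PySem.Str.join "\n" lines

-- ===== PORT B =====
-- rank(s) = (priority.index(s), "") if s in priority else (len(priority), s)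
def pvRank1 (s : String) : Int :=
  if pvPriority.contains s then (((PySem.List.index? pvPriority s).getD 0 : Nat) : Int)
  else (pvPriority.length : Int)
def pvRank2 (s : String) : String := if pvPriority.contains s then "" else s

def build_status_py_alt (entries : List (List (String × String))) : String :=
  let srcs := PySem.List.sorted2 (entries.map pvGetSource) pvRank1 pvRank2
  let lines0 : List String := ["Total: " ++ PySem.Int.toStr entries.length ++ " notebook entries"]
  -- single run-length scan over the sorted sources: state = (lines, prev, run)
  let st := srcs.foldl (fun (st : List String × Option String × Int) s =>
      if (some s : Option String) = st.2.1 then (st.1, st.2.1, st.2.2 + 1)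
      else match st.2.1 with
        | some p => (st.1 ++ ["  " ++ p ++ ": " ++ PySem.Int.toStr st.2.2], some s, (1 : Int))
        | none => (st.1, some s, (1 : Int))) (lines0, (none : Option String), (0 : Int))
  let lines := match st.2.1 with
    | some p => st.1 ++ ["  " ++ p ++ ": " ++ PySem.Int.toStr st.2.2]
    | none => st.1
  PySem.Str.join "\n" lines

-- ===== PRECONDITION & SPEC =====
def Spec_build_status_py (entries : List (List (String × String))) (out : String) : Prop := out = build_status_py_alt entries
instance (entries : List (List (String × String))) (out : String) : Decidable (Spec_build_status_py entries out) := by unfold Spec_build_status_py; infer_instance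

-- ===== CLAIM (what is proved, stated in full; the proofs are below) =====
def Claim_equal_build_status_py : Prop := ∀ (entries : List (List (String × String))), Dom_build_status_py entries → Spec_build_status_py entries (build_status_py entries)

-- ===== LEMMAS AND PROOFS =====

-- the line "  src: count" both programs emit
def pvLine (k : String) (n : Int) : String := "  " ++ k ++ ": " ++ PySem.Int.toStr n

-- the common emission order: priority sources present in srcs, then the other distinct sources alphabetically
def pvKeys (srcs : List String) : List String :=
  pvPriority.filter (fun k => decide (((srcs.count k : Int)) ≠ 0)) ++
  (PySem.List.sorted (PySem.Set.ofList srcs) (fun x => x)).filter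
    (fun k => decide (k ∉ pvPriority) && decide (((srcs.count k : Int)) ≠ 0))

-- the canonical result both sides are reduced to
def pvCanon (n : Int) (srcs : List String) : String :=
  PySem.Str.join "\n" (("Total: " ++ PySem.Int.toStr n ++ " notebook entries") ::
    (pvKeys srcs).map (fun k => pvLine k (srcs.count k)))

-- B's fold step / flush, named for the proofs
def pvStep (st : List String × Option String × Int) (s : String) : List String × Option String × Int :=
  if (some s : Option String) = st.2.1 then (st.1, st.2.1, st.2.2 + 1)
  else match st.2.1 with
    | some p => (st.1 ++ [pvLine p st.2.2], some s, (1 : Int))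
    | none => (st.1, some s, (1 : Int))
def pvFlush (st : List String × Option String × Int) : List String :=
  match st.2.1 with
  | some p => st.1 ++ [pvLine p st.2.2]
  | none => st.1

-- the single-string order embedding of B's rank key
def pvStrKey (s : String) : String :=
  if pvPriority.contains s then String.ofList [Char.ofNat (48 + ((PySem.List.index? pvPriority s).getD 0))]
  else String.ofList ('4' :: s.toList)

-- ---------- A side: reduce A to the canonical form ----------

theorem pv_insertBy_congr {α : Type} (p q : α → α → Bool) (x : α) :
    ∀ ys : List α, (∀ y ∈ ys, p x y = q x y) → PySem.List.insertBy p x ys = PySem.List.insertBy q x ys := by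
  intro ys
  induction ys with
  | nil => intro _; rfl
  | cons y ys ih =>
    intro h
    simp only [PySem.List.insertBy]
    rw [h y (by simp), ih (fun z hz => h z (by simp [hz]))]

theorem pv_foldl_insertBy_congr {α : Type} (p q : α → α → Bool) (m : List α)
    (hpq : ∀ a ∈ m, ∀ b ∈ m, p a b = q a b) :
    ∀ (l acc : List α), (∀ a ∈ l, a ∈ m) → (∀ a ∈ acc, a ∈ m) →
      l.foldl (fun acc x => PySem.List.insertBy p x acc) acc
        = l.foldl (fun acc x => PySem.List.insertBy q x acc) acc := by
  intro l
  induction l with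
  | nil => intro acc _ _; rfl
  | cons x l ih =>
    intro acc hl hacc
    simp only [List.foldl_cons]
    rw [pv_insertBy_congr p q x acc (fun y hy => hpq x (hl x (by simp)) y (hacc y hy))]
    exact ih _ (fun a ha => hl a (by simp [ha]))
      (fun a ha => by
        rcases (PySem.List.mem_insertBy _ x a acc).1 ha with h | h
        · exact h ▸ hl x (by simp)
        · exact hacc a h)

theorem pv_sorted2_pairs {ν : Type} [LinearOrder ν] [DecidableEq ν]
    (S : List String) (f : String → ν) :
    PySem.List.sorted2 (S.map (fun k => (k, f k))) (·.1) (·.2)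
      = PySem.List.sorted (S.map (fun k => (k, f k))) (·.1) := by
  rw [PySem.List.sorted_eq_foldl_insertBy]
  simp only [PySem.List.sorted2]
  apply pv_foldl_insertBy_congr _ _ (S.map (fun k => (k, f k)))
  · rintro a ha b hb
    simp only [List.mem_map] at ha hb
    obtain ⟨ka, hka, rfl⟩ := ha
    obtain ⟨kb, hkb, rfl⟩ := hb
    by_cases hlt : ka < kb
    · simp [hlt]
    · by_cases hgt : kb < ka
      · simp [hlt, hgt]
      · have : ka = kb := le_antisymm (not_lt.1 hgt) (not_lt.1 hlt)
        subst this
        simp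
  · exact fun a ha => ha
  · intro a ha; cases ha

theorem pv_sorted_map_pairs {ν : Type} [LinearOrder ν]
    (xs : List String) (f : String → ν) :
    PySem.List.sorted ((PySem.Set.ofList xs).map (fun k => (k, f k))) (·.1)
      = (PySem.List.sorted (PySem.Set.ofList xs) (fun x => x)).map (fun k => (k, f k)) := by
  apply PySem.List.sorted_eq_of_perm_of_pairwise_lt
  · exact List.Perm.map _ (PySem.List.sorted_perm _ _ _)
  · have := PySem.List.sorted_ofList_pairwise_lt xs
    exact (List.pairwise_map).2 (this.imp (fun h => h))

-- A reduced to the canonical form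

theorem pv_A_canon (entries : List (List (String × String))) :
    build_status_py entries = pvCanon entries.length (entries.map pvGetSource) := by
  unfold build_status_py pvCanon
  simp only []
  set srcs := entries.map pvGetSource with hsrcs
  have hdict : entries.foldl (fun d e =>
      let src := pvGetSource e
      d.insert src (d.getD src 0 + 1)) PySem.Dict.empty = PySem.Dict.counter srcs := by
    rw [hsrcs, ← PySem.Dict.foldl_insert_getD_add_one_eq_counter, List.foldl_map]
  rw [hdict]
  have hitems : PySem.List.sorted2 (PySem.Dict.counter srcs).items (·.1) (·.2)
      = (PySem.List.sorted (PySem.Set.ofList srcs) (fun x => x)).map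
          (fun k => (k, (srcs.count k : Int))) := by
    rw [PySem.Dict.items_counter, pv_sorted2_pairs _ _, pv_sorted_map_pairs]
  rw [hitems]
  congr 1
  rw [List.foldl_map]
  -- P pass
  have hP : ∀ (init : List String),
      pvPriority.foldl (fun ls src =>
        let count := (PySem.Dict.counter srcs).getD src 0
        if count ≠ 0 then ls ++ ["  " ++ src ++ ": " ++ PySem.Int.toStr count] else ls) init
      = init ++ (pvPriority.filter (fun k => decide ((srcs.count k : Int) ≠ 0))).map
          (fun k => pvLine k (srcs.count k)) := by
    intro init
    rw [← PySem.List.foldl_append_if (fun k => decide ((srcs.count k : Int) ≠ 0))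
      (fun k => pvLine k (srcs.count k))]
    apply PySem.List.foldl_congr_mem
    intro acc x _
    simp only [PySem.Dict.getD_counter, pvLine]
    by_cases h2 : (srcs.count x : Int) = 0 <;> simp [h2]
  have hD : ∀ (init : List String),
      (PySem.List.sorted (PySem.Set.ofList srcs) (fun x => x)).foldl
        (fun ls k =>
          if (k, (srcs.count k : Int)).1 ∉ pvPriority ∧ (k, (srcs.count k : Int)).2 ≠ 0
          then ls ++ ["  " ++ (k, (srcs.count k : Int)).1 ++ ": "
                        ++ PySem.Int.toStr (k, (srcs.count k : Int)).2] else ls) init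
      = init ++ ((PySem.List.sorted (PySem.Set.ofList srcs) (fun x => x)).filter
          (fun k => decide (k ∉ pvPriority) && decide ((srcs.count k : Int) ≠ 0))).map
            (fun k => pvLine k (srcs.count k)) := by
    intro init
    rw [← PySem.List.foldl_append_if
      (fun k => decide (k ∉ pvPriority) && decide ((srcs.count k : Int) ≠ 0))
      (fun k => pvLine k (srcs.count k))]
    apply PySem.List.foldl_congr_mem
    intro acc x _
    by_cases h1 : x ∈ pvPriority <;> by_cases h2 : (srcs.count x : Int) = 0 <;> simp [h1, h2, pvLine]
  rw [hP, hD, pvKeys, List.map_append, List.append_assoc]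
  simp

-- ---------- B side: the sort equals the grouped key list ----------

theorem pv_mem_P (a : String) (h : pvPriority.contains a = true) :
    a = "ingestor" ∨ a = "scientist" ∨ a = "revision" ∨ a = "stop_gate" := by
  simpa [pvPriority] using h

theorem pv_i1 : (List.idxOf? "ingestor" ["ingestor", "scientist", "revision", "stop_gate"]).getD 0 = 0 := by decide

theorem pv_i2 : (List.idxOf? "scientist" ["ingestor", "scientist", "revision", "stop_gate"]).getD 0 = 1 := by decide

theorem pv_i3 : (List.idxOf? "revision" ["ingestor", "scientist", "revision", "stop_gate"]).getD 0 = 2 := by decide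

theorem pv_i4 : (List.idxOf? "stop_gate" ["ingestor", "scientist", "revision", "stop_gate"]).getD 0 = 3 := by decide

theorem pv_cmp (a b : String) :
    (decide (pvRank1 a < pvRank1 b) || !decide (pvRank1 b < pvRank1 a) && decide (pvRank2 a < pvRank2 b))
      = decide (pvStrKey a < pvStrKey b) := by
  by_cases ha : pvPriority.contains a = true <;> by_cases hb : pvPriority.contains b = true
  · rcases pv_mem_P a ha with rfl|rfl|rfl|rfl <;> rcases pv_mem_P b hb with rfl|rfl|rfl|rfl <;>
      simp [pvRank1, pvRank2, pvStrKey, pvPriority, List.cons_lt_cons_iff] <;> decide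
  · have hb' : ¬(b = "ingestor" ∨ b = "scientist" ∨ b = "revision" ∨ b = "stop_gate") := by
      simpa [pvPriority] using hb
    rcases pv_mem_P a ha with rfl|rfl|rfl|rfl <;>
      simp [pvRank1, pvRank2, pvStrKey, pvPriority, hb', List.cons_lt_cons_iff,
        pv_i1, pv_i2, pv_i3, pv_i4]
  · have ha' : ¬(a = "ingestor" ∨ a = "scientist" ∨ a = "revision" ∨ a = "stop_gate") := by
      simpa [pvPriority] using ha
    rcases pv_mem_P b hb with rfl|rfl|rfl|rfl <;>
      simp [pvRank1, pvRank2, pvStrKey, pvPriority, ha', List.cons_lt_cons_iff,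
        pv_i1, pv_i2, pv_i3, pv_i4]
  · have ha2 : a ∉ pvPriority := by simpa using ha
    have hb2 : b ∉ pvPriority := by simpa using hb
    simp [pvRank1, pvRank2, pvStrKey, ha2, hb2]

theorem pv_strKey_inj : Function.Injective pvStrKey := by
  intro a b h
  have ht := congrArg String.toList h
  have hh := congrArg (fun l => l.headD ' ') ht
  by_cases ha : pvPriority.contains a = true <;> by_cases hb : pvPriority.contains b = true
  · rcases pv_mem_P a ha with rfl|rfl|rfl|rfl <;> rcases pv_mem_P b hb with rfl|rfl|rfl|rfl <;>
      first | rfl | (exfalso; revert h; simp [pvStrKey, pvPriority]; decide)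
  · exfalso
    have hb' : ¬(b = "ingestor" ∨ b = "scientist" ∨ b = "revision" ∨ b = "stop_gate") := by
      simpa [pvPriority] using hb
    rcases pv_mem_P a ha with rfl|rfl|rfl|rfl <;>
      (revert hh; simp [pvStrKey, hb', pvPriority, String.toList_ofList]; decide)
  · exfalso
    have ha' : ¬(a = "ingestor" ∨ a = "scientist" ∨ a = "revision" ∨ a = "stop_gate") := by
      simpa [pvPriority] using ha
    rcases pv_mem_P b hb with rfl|rfl|rfl|rfl <;>
      (revert hh; simp [pvStrKey, ha', pvPriority, String.toList_ofList]; decide)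
  · have ha' : a ∉ pvPriority := by simpa using ha
    have hb' : b ∉ pvPriority := by simpa using hb
    simp [pvStrKey, ha', hb'] at ht
    exact String.toList_inj.mp ht

theorem pv_keys_nodup (srcs : List String) : (pvKeys srcs).Nodup := by
  apply List.Nodup.append
  · exact List.Nodup.filter _ (by decide)
  · exact List.Nodup.filter _ ((PySem.List.sorted_ofList_pairwise_lt srcs).imp ne_of_lt)
  · intro a ha hb
    have h1 := (List.mem_filter.1 ha).1
    have h2 := (List.mem_filter.1 hb).2
    simp at h2
    exact h2.1 h1

theorem pv_mem_keys (srcs : List String) (a : String) : a ∈ pvKeys srcs ↔ a ∈ srcs := by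
  unfold pvKeys
  constructor
  · intro h
    rcases List.mem_append.1 h with h | h
    · have h2 := (List.mem_filter.1 h).2
      simp at h2
      exact List.count_pos_iff.1 (by omega)
    · have h2 := (List.mem_filter.1 h).1
      rw [PySem.List.mem_sorted, PySem.Set.mem_ofList] at h2
      exact h2
  · intro h
    have hc : List.count a srcs ≠ 0 := by
      have := List.count_pos_iff.2 h
      omega
    by_cases hp : a ∈ pvPriority
    · exact List.mem_append.2 (Or.inl (List.mem_filter.2 ⟨hp, by simp [hc]⟩))
    · refine List.mem_append.2 (Or.inr (List.mem_filter.2 ⟨?_, by simp [hc, hp]⟩))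
      rw [PySem.List.mem_sorted, PySem.Set.mem_ofList]
      exact h

theorem pv_cross (x y : String) (hx : x ∈ pvPriority) (hy : y ∉ pvPriority) :
    pvStrKey x < pvStrKey y := by
  have hy' : ¬(y = "ingestor" ∨ y = "scientist" ∨ y = "revision" ∨ y = "stop_gate") := by
    simpa [pvPriority] using hy
  rw [String.lt_iff_toList_lt]
  fin_cases hx <;>
    simp [pvStrKey, hy', pvPriority, List.cons_lt_cons_iff, pv_i1, pv_i2, pv_i3, pv_i4]

theorem pv_keys_pairwise (srcs : List String) :
    (pvKeys srcs).Pairwise (fun x y => pvStrKey x < pvStrKey y) := by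
  rw [pvKeys, List.pairwise_append]
  refine ⟨?_, ?_, ?_⟩
  · refine List.Pairwise.filter _ ?_
    refine List.Pairwise.imp_of_mem (fun _ _ h => String.lt_iff_toList_lt.2 h) ?_
    decide
  · refine List.Pairwise.imp_of_mem ?_ (List.Pairwise.filter _ (PySem.List.sorted_ofList_pairwise_lt srcs))
    intro a b ha hb hlt
    have ha2 := (List.mem_filter.1 ha).2
    have hb2 := (List.mem_filter.1 hb).2
    simp at ha2 hb2
    rw [String.lt_iff_toList_lt]
    simp [pvStrKey, ha2.1, hb2.1]
    exact String.lt_iff_toList_lt.1 hlt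
  · intro a ha b hb
    have h1 := (List.mem_filter.1 ha).1
    have h2 := (List.mem_filter.1 hb).2
    simp at h2
    exact pv_cross a b h1 h2.1

theorem pv_count_flatMap (c : String → Nat) (a : String) :
    ∀ K : List String, K.Nodup →
      (K.flatMap (fun k => List.replicate (c k) k)).count a = if a ∈ K then c a else 0 := by
  intro K
  induction K with
  | nil => simp
  | cons k K ih =>
    intro hnd
    rw [List.flatMap_cons, List.count_append, List.count_replicate,
      ih (List.Nodup.of_cons hnd)]
    by_cases hak : k = a
    · subst hak
      have : k ∉ K := (List.nodup_cons.1 hnd).1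
      simp [this]
    · simp [hak, List.mem_cons, Ne.symm hak]

theorem pv_pairwise_flatMap (c : String → Nat) (K : List String)
    (h : K.Pairwise (fun x y => pvStrKey x < pvStrKey y)) :
    (K.flatMap (fun k => List.replicate (c k) k)).Pairwise
      (fun a b => pvStrKey a ≤ pvStrKey b) := by
  induction K with
  | nil => simp
  | cons k K ih =>
    rw [List.flatMap_cons, List.pairwise_append]
    refine ⟨List.pairwise_replicate.2 (Or.inr le_rfl), ih (List.Pairwise.of_cons h), ?_⟩
    intro a ha b hb
    have ha' : a = k := List.eq_of_mem_replicate ha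
    obtain ⟨k', hk', hb'⟩ := List.mem_flatMap.1 hb
    have hb2 : b = k' := List.eq_of_mem_replicate hb'
    rw [ha', hb2]
    exact le_of_lt ((List.pairwise_cons.1 h).1 k' hk')

-- the target of the sort: the ordered keys, each repeated by its multiplicity
def pvGroups (srcs : List String) : List String :=
  (pvKeys srcs).flatMap (fun k => List.replicate (srcs.count k) k)

theorem pv_sort_eq (srcs : List String) :
    PySem.List.sorted2 srcs pvRank1 pvRank2 = pvGroups srcs := by
  have hcmp : (fun a b : String => decide (pvRank1 a < pvRank1 b) ||
        !decide (pvRank1 b < pvRank1 a) && decide (pvRank2 a < pvRank2 b))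
      = (fun a b : String => decide (pvStrKey a < pvStrKey b)) := by
    funext a b
    exact pv_cmp a b
  have hs : PySem.List.sorted2 srcs pvRank1 pvRank2 = PySem.List.sorted srcs pvStrKey := by
    have hs0 : PySem.List.sorted2 srcs pvRank1 pvRank2
        = srcs.foldl (fun acc x => PySem.List.insertBy
            (fun a b : String => decide (pvRank1 a < pvRank1 b) ||
              !decide (pvRank1 b < pvRank1 a) && decide (pvRank2 a < pvRank2 b)) x acc) [] := rfl
    rw [hs0, hcmp, ← PySem.List.sorted_eq_foldl_insertBy]
  rw [hs, pvGroups]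
  apply PySem.List.eq_of_perm_of_pairwise_le_of_injective pvStrKey pv_strKey_inj
  · refine (PySem.List.sorted_perm _ _ _).trans ?_
    rw [List.perm_iff_count]
    intro a
    rw [pv_count_flatMap _ _ _ (pv_keys_nodup srcs)]
    by_cases h : a ∈ pvKeys srcs
    · simp [h]
    · have hns : a ∉ srcs := fun hm => h ((pv_mem_keys srcs a).2 hm)
      simp [h, List.count_eq_zero.2 hns]
  · exact PySem.List.sorted_pairwise srcs pvStrKey
  · exact pv_pairwise_flatMap _ _ (pv_keys_pairwise srcs)

-- ---------- B side: the run-length scan over the grouped list ----------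

theorem pv_fold_replicate (n : Nat) (lines : List String) (p : String) (r : Int) :
    (List.replicate n p).foldl pvStep (lines, some p, r) = (lines, some p, r + n) := by
  induction n generalizing r with
  | zero => simp
  | succ n ih =>
    rw [List.replicate_succ, List.foldl_cons]
    have h1 : pvStep (lines, some p, r) p = (lines, some p, r + 1) := by simp [pvStep]
    rw [h1, ih]
    refine congrArg _ (congrArg _ ?_)
    push_cast
    ring

theorem pv_fold_groups (c : String → Nat) :
    ∀ (K : List String), K.Nodup → (∀ k ∈ K, c k ≠ 0) →
      ∀ (lines : List String) (p : String) (r : Int), p ∉ K →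
        pvFlush ((K.flatMap (fun k => List.replicate (c k) k)).foldl pvStep (lines, some p, r))
          = lines ++ [pvLine p r] ++ K.map (fun k => pvLine k ((c k : Int))) := by
  intro K
  induction K with
  | nil => intro _ _ lines p r _; simp [pvFlush]
  | cons k K ih =>
    intro hnd hpos lines p r hpK
    obtain ⟨m, hm⟩ : ∃ m, c k = m + 1 := ⟨c k - 1, by have := hpos k (by simp); omega⟩
    have hpk : p ≠ k := fun h => hpK (h ▸ List.mem_cons_self)
    rw [List.flatMap_cons, List.foldl_append, hm, List.replicate_succ, List.foldl_cons]
    have h1 : pvStep (lines, some p, r) k = (lines ++ [pvLine p r], some k, (1 : Int)) := by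
      simp [pvStep, Ne.symm hpk]
    rw [h1, pv_fold_replicate,
      ih (List.Nodup.of_cons hnd) (fun k' h => hpos k' (List.mem_cons_of_mem _ h)) _ k _
        (List.nodup_cons.1 hnd).1]
    rw [List.map_cons]
    have h2 : (1 : Int) + m = (c k : Int) := by rw [hm]; push_cast; ring
    rw [h2]
    simp

theorem pv_fold_groups_none (c : String → Nat) (K : List String)
    (hnd : K.Nodup) (hpos : ∀ k ∈ K, c k ≠ 0) (lines : List String) :
    pvFlush ((K.flatMap (fun k => List.replicate (c k) k)).foldl pvStep (lines, none, 0))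
      = lines ++ K.map (fun k => pvLine k ((c k : Int))) := by
  cases K with
  | nil => simp [pvFlush]
  | cons k K =>
    obtain ⟨m, hm⟩ : ∃ m, c k = m + 1 := ⟨c k - 1, by have := hpos k (by simp); omega⟩
    rw [List.flatMap_cons, List.foldl_append, hm, List.replicate_succ, List.foldl_cons]
    have h1 : pvStep (lines, none, 0) k = (lines, some k, (1 : Int)) := by simp [pvStep]
    rw [h1, pv_fold_replicate,
      pv_fold_groups c K (List.Nodup.of_cons hnd) (fun k' h => hpos k' (List.mem_cons_of_mem _ h))
        _ k _ (List.nodup_cons.1 hnd).1]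
    rw [List.map_cons]
    have h2 : (1 : Int) + m = (c k : Int) := by rw [hm]; push_cast; ring
    rw [h2]
    simp

theorem pv_B_canon (entries : List (List (String × String))) :
    build_status_py_alt entries = pvCanon entries.length (entries.map pvGetSource) := by
  unfold build_status_py_alt
  simp only []
  set srcs := entries.map pvGetSource with hsrcs
  rw [pv_sort_eq]
  have hstep : (fun (st : List String × Option String × Int) s =>
      if (some s : Option String) = st.2.1 then (st.1, st.2.1, st.2.2 + 1)
      else match st.2.1 with
        | some p => (st.1 ++ ["  " ++ p ++ ": " ++ PySem.Int.toStr st.2.2], some s, (1 : Int))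
        | none => (st.1, some s, (1 : Int))) = pvStep := by
    funext st s
    rfl
  rw [hstep]
  have hpos : ∀ k ∈ pvKeys srcs, srcs.count k ≠ 0 := by
    intro k hk
    have := List.count_pos_iff.2 ((pv_mem_keys srcs k).1 hk)
    omega
  have := pv_fold_groups_none (fun k => srcs.count k) (pvKeys srcs) (pv_keys_nodup srcs) hpos
    ["Total: " ++ PySem.Int.toStr entries.length ++ " notebook entries"]
  rw [pvGroups]
  change PySem.Str.join "\n" (pvFlush _) = _
  rw [this, pvCanon]
  simp

-- ===== VERDICT (by name: the statement is the Claim_ definition above) =====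
theorem build_status_py_spec : Claim_equal_build_status_py := by
  intro entries _
  unfold Spec_build_status_py
  rw [pv_A_canon, pv_B_canon]
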